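-- pv_equiv track=rewrite | github.com/Pikerozzo/causal-llms | src/gpt - Copia.py | preprocess_edges
-- ===== SOURCE A (Python) =====
-- def preprocess_edges(edges):
--     nodes = set()
--     processed_edges = set()
--     directed_edges = set()
--     nodes_with_incoming_edges = set()
--
--     for (n1, n2), answer in edges:
--
--         nodes.add(n1)
--         nodes.add(n2)
--
--         if answer == 'A':
--             processed_edges.add((n1, n2))
--             directed_edges.add((n1, n2))
--             nodes_with_incoming_edges.add(n2)
--         elif answer == 'B':
--             processed_edges.add((n2, n1))
--             directed_edges.add((n2, n1))
--             nodes_with_incoming_edges.add(n1)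
--         elif answer == 'D':
--             processed_edges.add((n1, n2))
--             processed_edges.add((n2, n1))
--
--
--     nodes_without_incoming_edges = nodes - nodes_with_incoming_edges
--
--     return nodes, processed_edges, directed_edges, nodes_without_incoming_edges
-- ===== SOURCE B (Python) =====
-- def _scan(edges):
--     # divide and conquer: combine the four sets of each half with set union
--     if len(edges) == 0:
--         return set(), set(), set(), set()
--     if len(edges) == 1:
--         (n1, n2), a = edges[0]
--         nodes = {n1, n2}
--         if a == 'A':
--             return nodes, {(n1, n2)}, {(n1, n2)}, {n2}
--         if a == 'B':
--             return nodes, {(n2, n1)}, {(n2, n1)}, {n1}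
--         if a == 'D':
--             return nodes, {(n1, n2), (n2, n1)}, set(), set()
--         return nodes, set(), set(), set()
--     mid = len(edges) // 2
--     ln, lp, ld, li = _scan(edges[:mid])
--     rn, rp, rd, ri = _scan(edges[mid:])
--     return ln | rn, lp | rp, ld | rd, li | ri
--
--
-- def preprocess_edges(edges):
--     nodes, processed, directed, incoming = _scan(edges)
--     return nodes, processed, directed, nodes - incoming
-- ===== Notes on version B (the rewrite author's own statement) =====
-- stated objective: alternative
-- what changed: Replaced the single accumulating loop over four threaded sets by a divide-and-conquer scan: split the edge list in half, recursively build the four sets for each half, and merge halves with set union; the no-incoming set is a final set difference.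
import Mathlib
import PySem

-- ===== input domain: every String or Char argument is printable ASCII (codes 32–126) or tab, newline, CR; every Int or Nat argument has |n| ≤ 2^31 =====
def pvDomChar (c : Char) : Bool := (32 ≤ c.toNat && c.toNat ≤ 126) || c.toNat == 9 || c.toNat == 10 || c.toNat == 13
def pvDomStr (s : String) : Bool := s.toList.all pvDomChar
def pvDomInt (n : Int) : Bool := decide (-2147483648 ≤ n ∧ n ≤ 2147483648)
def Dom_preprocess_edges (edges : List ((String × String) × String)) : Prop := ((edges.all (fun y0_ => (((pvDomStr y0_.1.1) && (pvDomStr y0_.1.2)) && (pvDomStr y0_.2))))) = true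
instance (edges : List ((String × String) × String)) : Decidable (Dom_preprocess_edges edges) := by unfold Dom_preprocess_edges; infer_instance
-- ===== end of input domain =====

-- B replaces A's single accumulating loop by a divide-and-conquer scan that merges the
-- four sets of each half with set union (alternative decomposition, same results).

-- ===== PORT A =====
-- A: one loop over edges threading four sets (nodes, processed, directed, incoming), then a set difference.
def preprocess_edges (edges : List ((String × String) × String)) : List String × (List (String × String)) × (List (String × String)) × List String :=
  let st := edges.foldl
    (fun (st : PySem.Set String × PySem.Set (String × String) × PySem.Set (String × String) × PySem.Set String) e =>
      let n1 := e.1.1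
      let n2 := e.1.2
      let answer := e.2
      let nodes := PySem.Set.add (PySem.Set.add st.1 n1) n2
      if answer == "A" then
        (nodes, PySem.Set.add st.2.1 (n1, n2), PySem.Set.add st.2.2.1 (n1, n2), PySem.Set.add st.2.2.2 n2)
      else if answer == "B" then
        (nodes, PySem.Set.add st.2.1 (n2, n1), PySem.Set.add st.2.2.1 (n2, n1), PySem.Set.add st.2.2.2 n1)
      else if answer == "D" then
        (nodes, PySem.Set.add (PySem.Set.add st.2.1 (n1, n2)) (n2, n1), st.2.2.1, st.2.2.2)
      else
        (nodes, st.2.1, st.2.2.1, st.2.2.2))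
    (PySem.Set.empty, PySem.Set.empty, PySem.Set.empty, PySem.Set.empty)
  (st.1, st.2.1, st.2.2.1, PySem.Set.diff st.1 st.2.2.2)

-- ===== PORT B =====
-- B: divide and conquer. _scan splits the edge list in half, recurses on both halves,
-- and merges the four sets of the halves with Python's set union `|` (PySem.Set.union).
def pvScan (edges : List ((String × String) × String)) : PySem.Set String × PySem.Set (String × String) × PySem.Set (String × String) × PySem.Set String :=
  if edges.length = 0 then
    (PySem.Set.empty, PySem.Set.empty, PySem.Set.empty, PySem.Set.empty)
  else if edges.length = 1 then
    -- edges[0]: the index 0 is in range since len(edges) = 1, so getD never takes the default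
    let e := (PySem.List.pyGet? edges 0).getD ((("", ""), ""))
    let n1 := e.1.1
    let n2 := e.1.2
    let a := e.2
    let nodes := PySem.Set.ofList [n1, n2]
    if a == "A" then (nodes, PySem.Set.ofList [(n1, n2)], PySem.Set.ofList [(n1, n2)], PySem.Set.ofList [n2])
    else if a == "B" then (nodes, PySem.Set.ofList [(n2, n1)], PySem.Set.ofList [(n2, n1)], PySem.Set.ofList [n1])
    else if a == "D" then (nodes, PySem.Set.ofList [(n1, n2), (n2, n1)], PySem.Set.empty, PySem.Set.empty)
    else (nodes, PySem.Set.empty, PySem.Set.empty, PySem.Set.empty)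
  else
    let mid := edges.length / 2
    -- edges[:mid] / edges[mid:] with 0 ≤ mid ≤ len(edges): exactly take/drop
    let l := pvScan (edges.take mid)
    let r := pvScan (edges.drop mid)
    (PySem.Set.union l.1 r.1, PySem.Set.union l.2.1 r.2.1,
     PySem.Set.union l.2.2.1 r.2.2.1, PySem.Set.union l.2.2.2 r.2.2.2)
termination_by edges.length
decreasing_by
  · simp only [List.length_take]
    omega
  · simp only [List.length_drop]
    omega

def preprocess_edges_alt (edges : List ((String × String) × String)) : List String × (List (String × String)) × (List (String × String)) × List String :=
  let st := pvScan edges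
  (st.1, st.2.1, st.2.2.1, PySem.Set.diff st.1 st.2.2.2)

-- ===== PRECONDITION & SPEC =====
def Spec_preprocess_edges (edges : List ((String × String) × String)) (out : List String × (List (String × String)) × (List (String × String)) × List String) : Prop := out = preprocess_edges_alt edges
instance (edges : List ((String × String) × String)) (out : List String × (List (String × String)) × (List (String × String)) × List String) : Decidable (Spec_preprocess_edges edges out) := by unfold Spec_preprocess_edges; infer_instance

-- ===== CLAIM =====
def Claim_equal_preprocess_edges : Prop := ∀ (edges : List ((String × String) × String)), Dom_preprocess_edges edges → Spec_preprocess_edges edges (preprocess_edges edges)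

-- ===== LEMMAS AND PROOFS =====

-- the per-edge contributions to each of the four sets
def pvGN (e : (String × String) × String) : List String := [e.1.1, e.1.2]
def pvGP (e : (String × String) × String) : List (String × String) :=
  if e.2 == "A" then [(e.1.1, e.1.2)]
  else if e.2 == "B" then [(e.1.2, e.1.1)]
  else if e.2 == "D" then [(e.1.1, e.1.2), (e.1.2, e.1.1)]
  else []
def pvGD (e : (String × String) × String) : List (String × String) :=
  if e.2 == "A" then [(e.1.1, e.1.2)]
  else if e.2 == "B" then [(e.1.2, e.1.1)]
  else []
def pvGI (e : (String × String) × String) : List String :=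
  if e.2 == "A" then [e.1.2]
  else if e.2 == "B" then [e.1.1]
  else []

-- A's loop state after processing `edges`, from arbitrary starting sets, equals
-- folding Set.add of the four per-edge contribution lists onto those starting sets.
theorem pv_loop_eq (edges : List ((String × String) × String))
    (s1 : PySem.Set String) (s2 s3 : PySem.Set (String × String)) (s4 : PySem.Set String) :
    edges.foldl
      (fun (st : PySem.Set String × PySem.Set (String × String) × PySem.Set (String × String) × PySem.Set String) e =>
        let n1 := e.1.1
        let n2 := e.1.2
        let answer := e.2
        let nodes := PySem.Set.add (PySem.Set.add st.1 n1) n2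
        if answer == "A" then
          (nodes, PySem.Set.add st.2.1 (n1, n2), PySem.Set.add st.2.2.1 (n1, n2), PySem.Set.add st.2.2.2 n2)
        else if answer == "B" then
          (nodes, PySem.Set.add st.2.1 (n2, n1), PySem.Set.add st.2.2.1 (n2, n1), PySem.Set.add st.2.2.2 n1)
        else if answer == "D" then
          (nodes, PySem.Set.add (PySem.Set.add st.2.1 (n1, n2)) (n2, n1), st.2.2.1, st.2.2.2)
        else
          (nodes, st.2.1, st.2.2.1, st.2.2.2))
      (s1, s2, s3, s4)
    = ((edges.flatMap pvGN).foldl PySem.Set.add s1,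
       (edges.flatMap pvGP).foldl PySem.Set.add s2,
       (edges.flatMap pvGD).foldl PySem.Set.add s3,
       (edges.flatMap pvGI).foldl PySem.Set.add s4) := by
  induction edges generalizing s1 s2 s3 s4 with
  | nil => rfl
  | cons e rest ih =>
    simp only [List.foldl_cons, List.flatMap_cons, List.foldl_append, pvGN, pvGP, pvGD, pvGI]
    by_cases hA : e.2 == "A"
    · simp only [hA, if_true, List.foldl_cons]
      exact ih _ _ _ _
    · rw [Bool.not_eq_true] at hA
      by_cases hB : e.2 == "B"
      · simp only [hA, hB, if_true, Bool.false_eq_true, if_false, List.foldl_cons]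
        exact ih _ _ _ _
      · rw [Bool.not_eq_true] at hB
        by_cases hD : e.2 == "D"
        · simp only [hA, hB, hD, if_true, Bool.false_eq_true, if_false, List.foldl_cons]
          exact ih _ _ _ _
        · rw [Bool.not_eq_true] at hD
          simp only [hA, hB, hD, Bool.false_eq_true, if_false, List.foldl_nil]
          exact ih _ _ _ _

-- set union of two ofLists is the ofList of the concatenation
theorem pv_union_ofList {α : Type} [BEq α] [LawfulBEq α] (xs ys : List α) :
    PySem.Set.union (PySem.Set.ofList xs) (PySem.Set.ofList ys) = PySem.Set.ofList (xs ++ ys) := by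
  show PySem.Set.update (PySem.Set.ofList xs) (PySem.Set.ofList ys) = _
  rw [PySem.Set.ofList_append, PySem.Set.update_eq_append_filter, PySem.Set.update_eq_append_filter,
      PySem.Set.ofList_ofList]

-- B's scan on a one-edge list is the ofList of that edge's contributions
theorem pvScan_single (e : (String × String) × String) :
    pvScan [e] = (PySem.Set.ofList (pvGN e), PySem.Set.ofList (pvGP e),
                  PySem.Set.ofList (pvGD e), PySem.Set.ofList (pvGI e)) := by
  rw [pvScan]
  rw [show PySem.List.pyGet? [e] (0 : Int) = some e from rfl]
  simp only [Option.getD_some, List.length_cons, List.length_nil]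
  norm_num [pvGN, pvGP, pvGD, pvGI]
  split_ifs <;> simp_all

-- B's scan returns the ofList of the concatenated per-edge contributions (strong induction on length)
theorem pvScan_eq_aux : ∀ (n : Nat) (edges : List ((String × String) × String)), edges.length = n →
    pvScan edges = (PySem.Set.ofList (edges.flatMap pvGN), PySem.Set.ofList (edges.flatMap pvGP),
                    PySem.Set.ofList (edges.flatMap pvGD), PySem.Set.ofList (edges.flatMap pvGI)) := by
  intro n
  induction n using Nat.strong_induction_on with
  | _ n ih =>
    intro edges hlen
    by_cases h0 : edges.length = 0
    · rw [List.length_eq_zero_iff] at h0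
      subst h0
      rw [pvScan]
      rfl
    · by_cases h1 : edges.length = 1
      · obtain ⟨e, rfl⟩ := List.length_eq_one_iff.mp h1
        simpa using pvScan_single e
      · rw [pvScan]
        simp only [h0, h1, if_false]
        have hmidlt : edges.length / 2 < edges.length := by omega
        have htake : (edges.take (edges.length / 2)).length < n := by
          simp only [List.length_take]
          omega
        have hdrop : (edges.drop (edges.length / 2)).length < n := by
          simp only [List.length_drop]
          omega
        rw [ih _ htake _ rfl, ih _ hdrop _ rfl]
        simp only [pv_union_ofList, ← List.flatMap_append, List.take_append_drop]

theorem pvScan_eq (edges : List ((String × String) × String)) :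
    pvScan edges = (PySem.Set.ofList (edges.flatMap pvGN), PySem.Set.ofList (edges.flatMap pvGP),
                    PySem.Set.ofList (edges.flatMap pvGD), PySem.Set.ofList (edges.flatMap pvGI)) :=
  pvScan_eq_aux edges.length edges rfl

-- ===== VERDICT =====
theorem preprocess_edges_spec : Claim_equal_preprocess_edges := by
  intro edges _
  show _ = _
  unfold preprocess_edges preprocess_edges_alt
  simp only [pv_loop_eq, pvScan_eq, PySem.Set.ofList_eq_foldl, PySem.Set.empty]
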